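-- pv_equiv track=rewrite | github.com/umar-tung/AOC | 2024/day9/day9.py | condense_block
-- ===== SOURCE A (Python) =====
-- def condense_block(block: list[str]) -> list[str]:
--
--     beg = 0
--
--     end = len(block) - 1
--
--     # move beginning to the first empty index
--
--     while beg < end:
--         while beg < end and block[beg] != ".":
--             beg+=1
--
--         while beg < end and block[end] == ".":
--             end -=1
--
--         # make the swap and move the indices
--
--         temp = block[beg]
--         block[beg] = block[end]
--         block[end] = temp
--
--         beg +=1
--         end -=1
--
--     return block
-- ===== SOURCE B (Python) =====
-- def condense_block(block: list[str]) -> list[str]: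
--     chars = [c for c in block if c != "."]
--     k = len(chars)
--     result = []
--     r = k - 1
--     for i in range(len(block)):
--         if i >= k:
--             result.append(".")
--         elif block[i] != ".":
--             result.append(block[i])
--         else:
--             result.append(chars[r])
--             r -= 1
--     block[:] = result
--     return block
-- ===== Notes on version B (the rewrite author's own statement) =====
-- stated objective: alternative
-- what changed: A compacts in place with a converging two-pointer swap loop; B precomputes the list of non-dot elements once and builds the result in a single forward pass, filling each gap before k from a right-to-left pointer into that list (same in-place mutation and returned identity).
import Mathlib
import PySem

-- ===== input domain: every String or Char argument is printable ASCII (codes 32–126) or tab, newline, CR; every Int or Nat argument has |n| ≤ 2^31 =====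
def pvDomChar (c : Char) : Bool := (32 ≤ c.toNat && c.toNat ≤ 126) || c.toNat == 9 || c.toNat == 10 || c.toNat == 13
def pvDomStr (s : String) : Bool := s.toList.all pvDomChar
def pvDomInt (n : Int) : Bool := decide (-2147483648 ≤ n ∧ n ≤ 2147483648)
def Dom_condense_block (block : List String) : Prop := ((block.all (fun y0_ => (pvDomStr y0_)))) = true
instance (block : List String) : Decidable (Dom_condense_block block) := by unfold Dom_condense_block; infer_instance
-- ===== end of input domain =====

-- B replaces A's converging two-pointer swap loop with a precompute-then-forward-fill pass
-- (objective: alternative). Both A and B mutate `block` in place in Python and return it;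
-- the equivalence proved here is about the returned value (B's mutation matches A's).

-- ===== PORT A =====
-- Python indexing block[i]: always in range under the loop guards (0 ≤ beg ≤ end < len);
-- ported via PySem.List.pyGet? with a .getD "" that is never taken on reachable states.
def pvGetA (l : List String) (i : Int) : String := (PySem.List.pyGet? l i).getD ""

-- while beg < end and block[beg] != ".": beg += 1   (fuel only makes the loop total;
-- (e - beg).toNat + 1 steps always suffice, so the fuel never runs out on real calls)
def pvAdvBeg (l : List String) : Nat → Int → Int → Int
  | 0, beg, _ => beg
  | n + 1, beg, e => if beg < e ∧ pvGetA l beg ≠ "." then pvAdvBeg l n (beg + 1) e else beg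

-- while beg < end and block[end] == ".": end -= 1
def pvAdvEnd (l : List String) : Nat → Int → Int → Int
  | 0, _, e => e
  | n + 1, beg, e => if beg < e ∧ pvGetA l e = "." then pvAdvEnd l n beg (e - 1) else e

-- the outer while loop; index .toNat is exact: indices are nonnegative on reachable states
def pvOuter : Nat → List String → Int → Int → List String
  | 0, l, _, _ => l
  | n + 1, l, beg, e =>
    if beg < e then
      let b2 := pvAdvBeg l ((e - beg).toNat + 1) beg e
      let e2 := pvAdvEnd l ((e - b2).toNat + 1) b2 e
      let temp := pvGetA l b2
      let l1 := l.set b2.toNat (pvGetA l e2)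
      let l2 := l1.set e2.toNat temp
      pvOuter n l2 (b2 + 1) (e2 - 1)
    else l

def condense_block (block : List String) : List String :=
  pvOuter (block.length + 1) block 0 ((block.length : Int) - 1)

-- ===== PORT B =====
-- for i in range(len(block)): append "." / block[i] / chars[r]
def pvFill (chars : List String) (k : Nat) : List String → Nat → Int → List String
  | [], _, _ => []
  | x :: xs, i, r =>
    if k ≤ i then "." :: pvFill chars k xs (i + 1) r
    else if x ≠ "." then x :: pvFill chars k xs (i + 1) r
    else ((PySem.List.pyGet? chars r).getD "") :: pvFill chars k xs (i + 1) (r - 1)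

def condense_block_alt (block : List String) : List String :=
  let chars := block.filter (fun c => c != ".")
  let k := chars.length
  pvFill chars k block 0 ((k : Int) - 1)

-- ===== PRECONDITION & SPEC =====
def Spec_condense_block (block : List String) (out : List String) : Prop := out = condense_block_alt block
instance (block : List String) (out : List String) : Decidable (Spec_condense_block block out) := by unfold Spec_condense_block; infer_instance

-- ===== CLAIM (what is proved, stated in full; the proofs are below) =====
def Claim_equal_condense_block : Prop := ∀ (block : List String), Dom_condense_block block → Spec_condense_block block (condense_block block)

-- ===== LEMMAS AND PROOFS =====

-- prefix of non-dots passes through pvFill unchanged while i stays below k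
theorem pvFill_nd_prefix (chars : List String) (k : Nat) (P rest : List String) (i : Nat) (r : Int)
    (hP : ∀ x ∈ P, x ≠ ".") (hk : i + P.length ≤ k) :
    pvFill chars k (P ++ rest) i r = P ++ pvFill chars k rest (i + P.length) r := by
  induction P generalizing i with
  | nil => simp
  | cons x P ih =>
    have hx : x ≠ "." := hP x (by simp)
    have hk' : i + 1 + P.length ≤ k := by simp at hk; omega
    have hidx : i + (x :: P).length = i + 1 + P.length := by simp; omega
    simp only [List.cons_append, pvFill]
    rw [hidx, if_neg (by omega), if_pos hx, ih (i+1) (fun y hy => hP y (by simp [hy])) hk']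

-- all-dot suffix past k is reproduced verbatim
theorem pvFill_dots (chars : List String) (k : Nat) (D : List String) (i : Nat) (r : Int)
    (hD : ∀ x ∈ D, x = ".") (hk : k ≤ i) :
    pvFill chars k D i r = D := by
  induction D generalizing i r with
  | nil => rfl
  | cons x D ih =>
    have hx : x = "." := hD x (by simp)
    simp only [pvFill, if_pos hk, hx]
    rw [ih (i+1) r (fun y hy => hD y (by simp [hy])) (by omega)]

-- a list that is non-dots followed by dots is a fixpoint of B
theorem alt_fixpoint (P D : List String) (hP : ∀ x ∈ P, x ≠ ".") (hD : ∀ x ∈ D, x = ".") :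
    condense_block_alt (P ++ D) = P ++ D := by
  have hfP : (P ++ D).filter (fun c => c != ".") = P := by
    rw [List.filter_append]
    rw [List.filter_eq_self.2 (by intro x hx; simpa using hP x hx)]
    rw [List.filter_eq_nil_iff.2 (by intro x hx; simpa using hD x hx), List.append_nil]
  unfold condense_block_alt
  simp only [hfP]
  rw [pvFill_nd_prefix _ _ P D 0 _ hP (by omega)]
  rw [pvFill_dots _ _ D _ _ hD (by omega)]

-- count of dots among the first elements whose absolute position is below k
def pvDC (k : Nat) : List String → Nat → Nat
  | [], _ => 0
  | x :: xs, i => (if x = "." ∧ i < k then 1 else 0) + pvDC k xs (i + 1)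

theorem pvDC_le (k : Nat) (t : List String) (i : Nat) : pvDC k t i ≤ k - i := by
  induction t generalizing i with
  | nil => simp [pvDC]
  | cons x xs ih =>
    have := ih (i + 1)
    simp only [pvDC]
    split_ifs with h
    · omega
    · omega

-- core alignment: chars lists P++c::F vs P++F++[c], r vs r-1, rests agreeing below k
theorem pvFill_core (P F : List String) (c : String) (k : Nat) (hk : k = P.length + F.length + 1)
    (t1 t2 : List String) (i : Nat) (r : Int)
    (hlen : t1.length = t2.length)
    (hagree : ∀ j : Nat, i + j < k → t1[j]? = t2[j]?)
    (hdc : (pvDC k t1 i : Int) ≤ r - P.length)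
    (hr : r ≤ (k : Int) - 1) :
    pvFill (P ++ c :: F) k t1 i r = pvFill (P ++ F ++ [c]) k t2 i (r - 1) := by
  induction t1 generalizing t2 i r with
  | nil =>
    cases t2 with
    | nil => rfl
    | cons y ys => simp at hlen
  | cons x xs ih =>
    cases t2 with
    | nil => simp at hlen
    | cons y ys =>
      simp only [List.length_cons] at hlen
      have hagree' : ∀ j : Nat, (i + 1) + j < k → xs[j]? = ys[j]? := by
        intro j hj
        have := hagree (j + 1) (by omega)
        simpa using this
      by_cases hik : k ≤ i
      · -- both emit "."
        simp only [pvFill, if_pos hik]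
        rw [ih ys (i+1) r (by omega) hagree' (by simp [pvDC, Nat.not_lt.2 hik] at hdc ⊢; omega) hr]
      · have hxy : x = y := by
          have := hagree 0 (by omega)
          simpa using this
        subst hxy
        by_cases hx : x = "."
        · -- fill from chars
          subst hx
          have hdc1 : (1 : Int) + pvDC k xs (i + 1) ≤ r - P.length := by
            simp [pvDC, (by omega : i < k)] at hdc; omega
          have hrP : (P.length : Int) + 1 ≤ r := by
            have : (0:Int) ≤ (pvDC k xs (i+1) : Int) := by positivity
            omega
          -- both fill with the same element F[r - P.length - 1]
          have hr0 : 0 ≤ r := by omega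
          have hrn : r = ((r.toNat : Nat) : Int) := by omega
          have hb1 : (P ++ c :: F)[r.toNat]? = F[r.toNat - P.length - 1]? := by
            rw [show P ++ c :: F = (P ++ [c]) ++ F by simp]
            rw [List.getElem?_append_right (by simp; omega)]
            congr 1
            simp
            omega
          have hb2 : (P ++ F ++ [c])[(r-1).toNat]? = F[r.toNat - P.length - 1]? := by
            rw [List.append_assoc, List.getElem?_append_right (by omega)]
            rw [List.getElem?_append_left (by omega)]
            congr 1
            omega
          simp only [pvFill, if_neg hik, if_neg (by decide : ¬("." ≠ "."))]
          rw [PySem.List.pyGet?_of_nonneg (P ++ c :: F) hr0,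
            PySem.List.pyGet?_of_nonneg (P ++ F ++ [c]) (show (0:Int) ≤ r - 1 by omega)]
          rw [hb1, hb2]
          congr 1
          rw [ih ys (i+1) (r-1) (by omega) hagree' (by omega) (by omega)]
        · -- same non-dot element on both sides
          simp only [pvFill, if_neg hik, if_pos hx]
          rw [ih ys (i+1) r (by omega) hagree' (by simp [pvDC, hx] at hdc ⊢; omega) hr]

-- the swap A performs does not change B's output
theorem alt_swap (P M D : List String) (c : String)
    (hP : ∀ x ∈ P, x ≠ ".") (hD : ∀ x ∈ D, x = ".") (hc : c ≠ ".") :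
    condense_block_alt (P ++ c :: (M ++ "." :: D)) = condense_block_alt (P ++ "." :: (M ++ c :: D)) := by
  have hPfil : P.filter (fun c => c != ".") = P := List.filter_eq_self.2 (by intro a ha; simpa using hP a ha)
  have hDfil : D.filter (fun c => c != ".") = [] := List.filter_eq_nil_iff.2 (by intro a ha; simpa using hD a ha)
  have hcb : (c != ".") = true := by simpa using hc
  have hfil1 : (P ++ c :: (M ++ "." :: D)).filter (fun c => c != ".") = P ++ c :: M.filter (fun c => c != ".") := by
    simp [List.filter_append, hPfil, hDfil, hcb]
  have hfil2 : (P ++ "." :: (M ++ c :: D)).filter (fun c => c != ".") = P ++ M.filter (fun c => c != ".") ++ [c] := by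
    simp [List.filter_append, hPfil, hDfil, hcb]
  set F := M.filter (fun c => c != ".") with hFdef
  have hFle : F.length ≤ M.length := List.length_filter_le _ _
  set k := P.length + F.length + 1 with hkdef
  have hlen1 : (P ++ c :: F).length = k := by simp [hkdef]; omega
  have hlen2 : (P ++ F ++ [c]).length = k := by simp [hkdef]; omega
  simp only [condense_block_alt, hfil1, hfil2, hlen1, hlen2]
  rw [pvFill_nd_prefix (P ++ c :: F) k P (c :: (M ++ "." :: D)) 0 _ hP (by omega),
      pvFill_nd_prefix (P ++ F ++ [c]) k P ("." :: (M ++ c :: D)) 0 _ hP (by omega)]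
  congr 1
  simp only [Nat.zero_add]
  have hcval : (PySem.List.pyGet? (P ++ F ++ [c]) ((k : Int) - 1)).getD "" = c := by
    rw [PySem.List.pyGet?_of_nonneg (P ++ F ++ [c]) (by omega : (0:Int) ≤ (k : Int) - 1)]
    have h1 : ((k : Int) - 1).toNat = (P ++ F).length := by simp [hkdef]; omega
    rw [h1, List.getElem?_append_right (le_refl _)]
    simp
  have hstep1 : pvFill (P ++ c :: F) k (c :: (M ++ "." :: D)) P.length ((k : Int) - 1)
      = c :: pvFill (P ++ c :: F) k (M ++ "." :: D) (P.length + 1) ((k : Int) - 1) := by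
    simp only [pvFill]
    rw [if_neg (by omega), if_pos hc]
  have hstep2 : pvFill (P ++ F ++ [c]) k ("." :: (M ++ c :: D)) P.length ((k : Int) - 1)
      = c :: pvFill (P ++ F ++ [c]) k (M ++ c :: D) (P.length + 1) ((k : Int) - 1 - 1) := by
    simp only [pvFill]
    rw [if_neg (by omega), if_neg (by decide : ¬("." ≠ ".")), hcval]
  rw [hstep1, hstep2]
  congr 1
  refine pvFill_core P F c k (by omega) (M ++ "." :: D) (M ++ c :: D) (P.length + 1) ((k : Int) - 1)
    (by simp) ?_ ?_ (by omega)
  · intro j hj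
    have hjM : j < M.length := by omega
    rw [List.getElem?_append_left hjM, List.getElem?_append_left hjM]
  · have := pvDC_le k (M ++ "." :: D) (P.length + 1)
    omega

-- in-range getD is getElem
theorem getD_of_lt (l : List String) (j : Nat) (h : j < l.length) : l.getD j "" = l[j] := by
  rw [List.getD_eq_getElem?_getD, List.getElem?_eq_getElem h]
  rfl

-- pvGetA at a nonnegative index is plain getD
theorem pvGetA_eq (l : List String) (i : Int) (h0 : 0 ≤ i) : pvGetA l i = l.getD i.toNat "" := by
  unfold pvGetA
  rw [PySem.List.pyGet?_of_nonneg l h0, List.getD_eq_getElem?_getD]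

-- setting at the junction of an append
theorem set_len_append (P : List String) (x v : String) (t : List String) :
    (P ++ x :: t).set P.length v = P ++ v :: t := by
  induction P with
  | nil => rfl
  | cons y P ih => simp [ih]

-- elements left of the junction of a non-dot prefix and a non-dot head are non-dots
theorem getD_prefix_nd (P X : List String) (c : String)
    (hP : ∀ x ∈ P, x ≠ ".") (hc : c ≠ ".") (i : Nat) (hi : i < P.length + 1) :
    (P ++ c :: X).getD i "" ≠ "." := by
  rcases lt_or_ge i P.length with h | h
  · rw [List.getD_append _ _ _ _ h, getD_of_lt P i h]
    exact hP _ (List.getElem_mem h)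
  · have hip : i = P.length := by omega
    subst hip
    rw [List.getD_append_right _ _ _ _ le_rfl]
    simpa using hc

-- elements right of the junction of a dot head and all-dot tail are dots
theorem getD_suffix_dot (Y D : List String) (hD : ∀ x ∈ D, x = ".")
    (i : Nat) (hi : Y.length ≤ i) (hlen : i < Y.length + 1 + D.length) :
    (Y ++ "." :: D).getD i "" = "." := by
  rw [List.getD_append_right _ _ _ _ hi]
  rcases h : i - Y.length with _ | j
  · rfl
  · have hj : j < D.length := by omega
    show D.getD j "" = "."
    rw [getD_of_lt D j hj]
    exact hD _ (List.getElem_mem hj)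

-- the first inner loop only moves the pointer right
theorem pvAdvBeg_ge (l : List String) (n : Nat) (beg e : Int) : beg ≤ pvAdvBeg l n beg e := by
  induction n generalizing beg with
  | zero => simp [pvAdvBeg]
  | succ n ih =>
    by_cases h : beg < e ∧ pvGetA l beg ≠ "."
    · have := ih (beg + 1)
      simp only [pvAdvBeg, if_pos h]
      omega
    · simp [pvAdvBeg, h]

-- the second inner loop only moves the pointer left
theorem pvAdvEnd_le (l : List String) (n : Nat) (beg e : Int) : pvAdvEnd l n beg e ≤ e := by
  induction n generalizing e with
  | zero => simp [pvAdvEnd]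
  | succ n ih =>
    by_cases h : beg < e ∧ pvGetA l e = "."
    · have := ih (e - 1)
      simp only [pvAdvEnd, if_pos h]
      omega
    · simp [pvAdvEnd, h]

-- characterization of the first inner while loop (with sufficient fuel)
theorem pvAdvBeg_spec (l : List String) (n : Nat) (beg e : Int) :
    (e - beg).toNat ≤ n → beg ≤ e →
    (pvAdvBeg l n beg e ≤ e ∧
     (∀ i : Int, beg ≤ i → i < pvAdvBeg l n beg e → pvGetA l i ≠ ".") ∧
     (pvAdvBeg l n beg e < e → pvGetA l (pvAdvBeg l n beg e) = ".")) := by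
  induction n generalizing beg with
  | zero =>
    intro hf hbe
    have : beg = e := by omega
    subst this
    simp only [pvAdvBeg]
    exact ⟨le_rfl, by intro i h1 h2; omega, by intro h'; omega⟩
  | succ n ih =>
    intro hf hbe
    by_cases h : beg < e ∧ pvGetA l beg ≠ "."
    · obtain ⟨h1, h2⟩ := h
      obtain ⟨ih1, ih2, ih3⟩ := ih (beg + 1) (by omega) (by omega)
      simp only [pvAdvBeg, if_pos (And.intro h1 h2)]
      refine ⟨ih1, ?_, ih3⟩
      intro i hi1 hi2
      rcases eq_or_lt_of_le hi1 with rfl | hlt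
      · exact h2
      · exact ih2 i (by omega) hi2
    · simp only [pvAdvBeg, if_neg h]
      refine ⟨hbe, by intro i h1 h2; omega, ?_⟩
      intro hlt
      by_contra hne
      exact h ⟨hlt, hne⟩

-- characterization of the second inner while loop (with sufficient fuel)
theorem pvAdvEnd_spec (l : List String) (n : Nat) (beg e : Int) :
    (e - beg).toNat ≤ n → beg ≤ e →
    (beg ≤ pvAdvEnd l n beg e ∧
     (∀ i : Int, pvAdvEnd l n beg e < i → i ≤ e → pvGetA l i = ".") ∧
     (beg < pvAdvEnd l n beg e → pvGetA l (pvAdvEnd l n beg e) ≠ ".")) := by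
  induction n generalizing e with
  | zero =>
    intro hf hbe
    have : beg = e := by omega
    subst this
    simp only [pvAdvEnd]
    exact ⟨le_rfl, by intro i h1 h2; omega, by intro h'; omega⟩
  | succ n ih =>
    intro hf hbe
    by_cases h : beg < e ∧ pvGetA l e = "."
    · obtain ⟨h1, h2⟩ := h
      obtain ⟨ih1, ih2, ih3⟩ := ih (e - 1) (by omega) (by omega)
      simp only [pvAdvEnd, if_pos (And.intro h1 h2)]
      refine ⟨ih1, ?_, ih3⟩
      intro i hi1 hi2
      rcases eq_or_lt_of_le hi2 with rfl | hlt
      · exact h2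
      · exact ih2 i hi1 (by omega)
    · simp only [pvAdvEnd, if_neg h]
      refine ⟨hbe, by intro i h1 h2; omega, ?_⟩
      intro hlt hne
      exact h ⟨hlt, hne⟩

-- the outer loop does nothing once the pointers have crossed
theorem pvOuter_stop (n : Nat) (l : List String) (beg e : Int) (h : ¬ beg < e) :
    pvOuter n l beg e = l := by
  cases n with
  | zero => rfl
  | succ n => simp [pvOuter, h]

-- decomposition: pointwise "non-dots then dots (position m free)" gives the split
theorem decompose (l : List String) (m : Int)
    (h : ∀ i : Nat, i < l.length → ((i : Int) < m → l.getD i "" ≠ ".") ∧ (m < (i : Int) → l.getD i "" = ".")) :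
    ∃ P D : List String, l = P ++ D ∧ (∀ x ∈ P, x ≠ ".") ∧ (∀ x ∈ D, x = ".") := by
  induction l generalizing m with
  | nil => exact ⟨[], [], by simp, by simp, by simp⟩
  | cons x xs ih =>
    by_cases hx : x = "."
    · refine ⟨[], x :: xs, by simp, by simp, ?_⟩
      have hm : ¬ (0 : Int) < m := by
        intro hm
        exact ((h 0 (by simp)).1 hm) (by simpa using hx)
      intro y hy
      rcases List.mem_cons.1 hy with rfl | hy'
      · exact hx
      · obtain ⟨j, hj, rfl⟩ := List.getElem_of_mem hy'
        have := (h (j+1) (by simpa using Nat.succ_lt_succ hj)).2 (by push_cast; omega)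
        simpa [List.getD, List.getElem?_cons_succ, List.getElem?_eq_getElem hj] using this
    · obtain ⟨P, D, hPD, hP, hD⟩ := ih (m - 1) (by
        intro i hi
        have := h (i+1) (by simpa using Nat.succ_lt_succ hi)
        constructor
        · intro hlt
          have := this.1 (by push_cast; omega)
          simpa [List.getD] using this
        · intro hgt
          have := this.2 (by push_cast; omega)
          simpa [List.getD] using this)
      exact ⟨x :: P, D, by simp [hPD], by intro y hy; rcases List.mem_cons.1 hy with rfl | hy'; exact hx; exact hP y hy', hD⟩

theorem outer_eq (n : Nat) (l : List String) (beg e : Int) :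
    e - beg < (n : Int) → 0 ≤ beg → e ≤ (l.length : Int) - 1 →
    (∀ i : Nat, i < l.length → (i : Int) < beg → l.getD i "" ≠ ".") →
    (∀ i : Nat, i < l.length → e < (i : Int) → l.getD i "" = ".") →
    pvOuter n l beg e = condense_block_alt l := by
  induction n generalizing l beg e with
  | zero =>
    intro hf h0 hlen hpre hsuf
    simp only [pvOuter]
    obtain ⟨P, D, hPD, hPnd, hDdot⟩ := decompose l beg (by
      intro i hi
      exact ⟨fun hlt => hpre i hi hlt, fun hgt => hsuf i hi (by omega)⟩)
    rw [hPD, alt_fixpoint P D hPnd hDdot]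
  | succ n ih =>
    intro hf h0 hlen hpre hsuf
    by_cases h : beg < e
    case neg =>
      simp only [pvOuter, if_neg h]
      obtain ⟨P, D, hPD, hPnd, hDdot⟩ := decompose l beg (by
        intro i hi
        exact ⟨fun hlt => hpre i hi hlt, fun hgt => hsuf i hi (by omega)⟩)
      rw [hPD, alt_fixpoint P D hPnd hDdot]
    case pos =>
      simp only [pvOuter, if_pos h]
      set b2 := pvAdvBeg l ((e - beg).toNat + 1) beg e with hb2d
      set e2 := pvAdvEnd l ((e - b2).toNat + 1) b2 e with he2d
      set l2 := (l.set b2.toNat (pvGetA l e2)).set e2.toNat (pvGetA l b2) with hl2v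
      have hbe : beg ≤ e := le_of_lt h
      have hsb := pvAdvBeg_spec l ((e - beg).toNat + 1) beg e (by omega) hbe
      have hb2le : b2 ≤ e := hsb.1
      have hbint : ∀ i : Int, beg ≤ i → i < b2 → pvGetA l i ≠ "." := hsb.2.1
      have hbdot : b2 < e → pvGetA l b2 = "." := hsb.2.2
      have hb2ge : beg ≤ b2 := pvAdvBeg_ge l ((e - beg).toNat + 1) beg e
      have hse := pvAdvEnd_spec l ((e - b2).toNat + 1) b2 e (by omega) hb2le
      have he2ge : b2 ≤ e2 := hse.1
      have heint : ∀ i : Int, e2 < i → i ≤ e → pvGetA l i = "." := hse.2.1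
      have hend : b2 < e2 → pvGetA l e2 ≠ "." := hse.2.2
      have he2le : e2 ≤ e := pvAdvEnd_le l ((e - b2).toNat + 1) b2 e
      have hb2nn : 0 ≤ b2 := by omega
      have hndAll : ∀ i : Nat, i < l.length → (i : Int) < b2 → l.getD i "" ≠ "." := by
        intro i hi hlt
        rcases lt_or_ge (i : Int) beg with hb | hb
        · exact hpre i hi hb
        · have := hbint i hb hlt
          rwa [pvGetA_eq l i (by omega), Int.toNat_natCast] at this
      have hdotAll : ∀ i : Nat, i < l.length → e2 < (i : Int) → l.getD i "" = "." := by
        intro i hi hgt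
        by_cases hle : (i : Int) ≤ e
        · have := heint i hgt hle
          rwa [pvGetA_eq l i (by omega), Int.toNat_natCast] at this
        · exact hsuf i hi (by omega)
      rcases eq_or_lt_of_le he2ge with heq | hlt2
      · -- the pointers have met: the swap is a no-op and the list is already compact
        have hnblt : b2.toNat < l.length := by omega
        have hone : l.set b2.toNat (pvGetA l b2) = l := by
          rw [pvGetA_eq l b2 hb2nn, getD_of_lt l _ hnblt]
          exact List.set_getElem_self hnblt
        have hl2l : l2 = l := by
          rw [hl2v, ← heq, hone, hone]
        rw [hl2l, pvOuter_stop n l _ _ (by omega)]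
        obtain ⟨P, D, hPD, hPnd, hDdot⟩ := decompose l b2 (by
          intro i hi
          exact ⟨hndAll i hi, fun hgt => hdotAll i hi (by omega)⟩)
        rw [hPD, alt_fixpoint P D hPnd hDdot]
      · -- a genuine swap of a gap at b2 with a filled cell at e2
        have hdot_b2 : l.getD b2.toNat "" = "." := by
          rw [← pvGetA_eq l b2 hb2nn]
          exact hbdot (by omega)
        have hnd_e2 : l.getD e2.toNat "" ≠ "." := by
          rw [← pvGetA_eq l e2 (by omega)]
          exact hend hlt2
        set nb := b2.toNat with hnbdef
        set ne := e2.toNat with hnedef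
        have hnb : (nb : Int) = b2 := Int.toNat_of_nonneg hb2nn
        have hne : (ne : Int) = e2 := Int.toNat_of_nonneg (by omega)
        have hnbne : nb < ne := by omega
        have hnelt : ne < l.length := by omega
        set c := l.getD ne "" with hcdef
        set P := l.take nb with hPdef
        set M := (l.drop (nb + 1)).take (ne - nb - 1) with hMdef
        set D := l.drop (ne + 1) with hDdef
        have hlP : P.length = nb := by rw [hPdef]; simp; omega
        have hlM : M.length = ne - nb - 1 := by rw [hMdef]; simp; omega
        have hlD : D.length = l.length - (ne + 1) := by rw [hDdef]; simp
        have hcnd : c ≠ "." := hcdef ▸ hnd_e2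
        have hsplit : l = P ++ "." :: (M ++ c :: D) := by
          have h2 : l.drop nb = "." :: l.drop (nb + 1) := by
            rw [List.drop_eq_getElem_cons (show nb < l.length by omega)]
            congr 1
            rw [← getD_of_lt l nb (by omega)]
            exact hdot_b2
          have h3 : l.drop (nb + 1) = M ++ l.drop ne := by
            conv_lhs => rw [← List.take_append_drop (ne - nb - 1) (l.drop (nb + 1))]
            rw [List.drop_drop, show nb + 1 + (ne - nb - 1) = ne from by omega, ← hMdef]
          have h4 : l.drop ne = c :: D := by
            rw [List.drop_eq_getElem_cons hnelt]
            congr 1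
            rw [← getD_of_lt l ne hnelt, ← hcdef]
          calc l = P ++ l.drop nb := by rw [hPdef, List.take_append_drop]
            _ = P ++ "." :: (M ++ c :: D) := by rw [h2, h3, h4]
        have hYlen : (P ++ c :: M).length = ne := by
          simp [hlP, hlM]
          omega
        have hl2split : l2 = P ++ c :: (M ++ "." :: D) := by
          have hgb : pvGetA l b2 = "." := hbdot (by omega)
          have hge : pvGetA l e2 = c := by
            rw [pvGetA_eq l e2 (by omega), ← hnedef, ← hcdef]
          rw [hl2v, hgb, hge]
          conv_lhs => rw [hsplit]
          rw [← hlP, set_len_append]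
          rw [show P ++ c :: (M ++ c :: D) = (P ++ c :: M) ++ c :: D from by simp]
          rw [← hYlen, set_len_append]
          simp
        have hPnd : ∀ x ∈ P, x ≠ "." := by
          intro x hx
          obtain ⟨j, hj, rfl⟩ := List.getElem_of_mem hx
          have hjl : j < nb := hlP ▸ hj
          have hgd : P.getD j "" ≠ "." := by
            rw [hPdef, List.getD_eq_getElem?_getD, List.getElem?_take_of_lt hjl,
              ← List.getD_eq_getElem?_getD]
            exact hndAll j (by omega) (by omega)
          rwa [getD_of_lt P j hj] at hgd
        have hDdot : ∀ x ∈ D, x = "." := by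
          intro x hx
          obtain ⟨j, hj, rfl⟩ := List.getElem_of_mem hx
          have hjl : ne + 1 + j < l.length := by
            have := hlD ▸ hj
            omega
          have hgd : D.getD j "" = "." := by
            rw [hDdef, List.getD_eq_getElem?_getD, List.getElem?_drop,
              ← List.getD_eq_getElem?_getD]
            exact hdotAll (ne + 1 + j) hjl (by push_cast; omega)
          rwa [getD_of_lt D j hj] at hgd
        have hll2 : l2.length = l.length := by
          rw [hl2split]
          conv_rhs => rw [hsplit]
          simp
        rw [ih l2 (b2 + 1) (e2 - 1) (by omega) (by omega) (by rw [hll2]; omega) ?pre2 ?suf2]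
        · rw [hl2split]
          conv_rhs => rw [hsplit]
          exact alt_swap P M D c hPnd hDdot hcnd
        case pre2 =>
          intro i hi hlt
          rw [hl2split]
          exact getD_prefix_nd P (M ++ "." :: D) c hPnd hcnd i (by omega)
        case suf2 =>
          intro i hi hgt
          have hil : i < l.length := hll2 ▸ hi
          rw [hl2split, show P ++ c :: (M ++ "." :: D) = (P ++ c :: M) ++ "." :: D from by simp]
          refine getD_suffix_dot (P ++ c :: M) D hDdot i (by omega) ?_
          have : l.length = (P ++ c :: M).length + 1 + D.length := by
            conv_lhs => rw [hsplit]
            simp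
            omega
          omega
-- ===== VERDICT (by name: the statement is the Claim_ definition above) =====
theorem condense_block_spec : Claim_equal_condense_block := by
  intro block _
  unfold Spec_condense_block condense_block
  exact outer_eq (block.length + 1) block 0 _ (by push_cast; omega) le_rfl (by omega)
    (by intro i _ h; omega)
    (by intro i hi h; omega)
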